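-- pv_equiv track=rewrite | github.com/rookiestar/Skills | eng-lang-tutor/scripts/utils/dedup.py | generate_excluded_list_prompt
-- ===== SOURCE A (Python) =====
-- from typing import Dict, Any, List, Set, Optional, Tuple
--
-- def generate_excluded_list_prompt(excluded_topics: List[str]) -> str:
--     """
--     Generate a prompt-friendly list of excluded topics.
--
--     Args:
--         excluded_topics: List of topic fingerprints
--
--     Returns:
--         Formatted string for LLM prompt
--     """
--     if not excluded_topics:
--         return "None (first content or no recent topics)"
--
--     # Group by prefix (e.g., "asking_", "workplace_")
--     grouped = {}
--     for topic in excluded_topics: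
--         parts = topic.split('_')
--         if len(parts) > 1:
--             prefix = parts[0]
--         else:
--             prefix = 'other'
--
--         if prefix not in grouped:
--             grouped[prefix] = []
--         grouped[prefix].append(topic)
--
--     lines = []
--     for prefix, topics in sorted(grouped.items()):
--         lines.append(f"- {prefix}: {', '.join(topics[:3])}{'...' if len(topics) > 3 else ''}")
--
--     return '\n'.join(lines)
-- ===== SOURCE B (Python) =====
-- def generate_excluded_list_prompt(excluded_topics):
--     """Format excluded topics grouped by prefix (sorted distinct prefixes + per-prefix filter; no dict grouping)."""
--     if not excluded_topics:
--         return "None (first content or no recent topics)"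
--
--     def prefix_key(topic):
--         parts = topic.split('_')
--         return parts[0] if len(parts) > 1 else 'other'
--
--     prefixes = sorted({prefix_key(t) for t in excluded_topics})
--     lines = []
--     for p in prefixes:
--         group = [t for t in excluded_topics if prefix_key(t) == p]
--         lines.append(f"- {p}: {', '.join(group[:3])}{'...' if len(group) > 3 else ''}")
--     return '\n'.join(lines)
-- ===== Notes on version B (the rewrite author's own statement) =====
-- stated objective: alternative
-- what changed: Replaces the dict-based group-accumulation plus sorted(items) with computing the sorted set of distinct prefixes once and rebuilding each group by filtering the input per prefix, so no mutable grouping structure is built.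
import Mathlib
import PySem

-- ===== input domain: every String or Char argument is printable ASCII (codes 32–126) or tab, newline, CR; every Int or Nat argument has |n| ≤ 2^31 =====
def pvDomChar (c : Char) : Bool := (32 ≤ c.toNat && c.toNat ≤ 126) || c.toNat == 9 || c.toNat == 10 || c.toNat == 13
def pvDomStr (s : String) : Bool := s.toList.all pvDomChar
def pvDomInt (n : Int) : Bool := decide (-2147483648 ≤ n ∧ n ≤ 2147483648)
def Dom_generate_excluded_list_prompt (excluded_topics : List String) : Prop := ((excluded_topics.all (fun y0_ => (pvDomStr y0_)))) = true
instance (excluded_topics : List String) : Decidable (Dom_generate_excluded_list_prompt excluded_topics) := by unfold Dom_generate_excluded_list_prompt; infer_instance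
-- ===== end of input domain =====

-- B replaces A's dict-based group accumulation + sorted(items) by a sorted set of distinct
-- prefixes and a per-prefix filter of the input (objective: alternative decomposition, same result).


-- ===== PORT A =====
-- parts = topic.split('_'); prefix = parts[0] if len(parts) > 1 else 'other'
-- (split by the nonempty separator "_" never raises, so split? is always `some`)
def pvPrefixA (topic : String) : String :=
  let parts := (PySem.Str.split? topic "_").getD []
  if parts.length > 1 then PySem.List.pyGetD parts 0 "" else "other"

-- f"- {prefix}: {', '.join(topics[:3])}{'...' if len(topics) > 3 else ''}"
def pvLineA (p : String × List String) : String :=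
  "- " ++ p.1 ++ ": " ++ PySem.Str.join ", " (PySem.List.slice p.2 none (some 3)) ++
    (if p.2.length > 3 then "..." else "")

def generate_excluded_list_prompt (excluded_topics : List String) : String :=
  if excluded_topics = [] then "None (first content or no recent topics)"
  else
    let grouped := excluded_topics.foldl (fun d topic =>
      let pfx := pvPrefixA topic
      let d := if d.contains pfx then d else d.insert pfx ([] : List String)
      d.insert pfx (d.getD pfx [] ++ [topic])) PySem.Dict.empty
    -- sorted(grouped.items()): dict keys are pairwise distinct, so Python's lexicographic
    -- tuple comparison never reaches the second component — comparing by the key is exact here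
    let lines := (PySem.List.sorted grouped.items (fun p => p.1)).map pvLineA
    PySem.Str.join "\n" lines

-- ===== PORT B =====
-- prefix_key(topic): parts = topic.split('_'); parts[0] if len(parts) > 1 else 'other'
def pvPrefixKey (topic : String) : String :=
  let parts := (PySem.Str.split? topic "_").getD []
  if parts.length > 1 then PySem.List.pyGetD parts 0 "" else "other"

-- f"- {p}: {', '.join(group[:3])}{'...' if len(group) > 3 else ''}"
def pvLineB (pfx : String) (group : List String) : String :=
  "- " ++ pfx ++ ": " ++ PySem.Str.join ", " (PySem.List.slice group none (some 3)) ++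
    (if group.length > 3 then "..." else "")

def generate_excluded_list_prompt_alt (excluded_topics : List String) : String :=
  if excluded_topics = [] then "None (first content or no recent topics)"
  else
    let prefixes := PySem.List.sorted (PySem.Set.ofList (excluded_topics.map pvPrefixKey)) (fun x => x)
    PySem.Str.join "\n" (prefixes.map (fun p =>
      pvLineB p (excluded_topics.filter (fun t => pvPrefixKey t == p))))

-- ===== PRECONDITION & SPEC =====
def Spec_generate_excluded_list_prompt (excluded_topics : List String) (out : String) : Prop := out = generate_excluded_list_prompt_alt excluded_topics
instance (excluded_topics : List String) (out : String) : Decidable (Spec_generate_excluded_list_prompt excluded_topics out) := by unfold Spec_generate_excluded_list_prompt; infer_instance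

-- ===== CLAIM (what is proved, stated in full; the proofs are below) =====
def Claim_equal_generate_excluded_list_prompt : Prop := ∀ (excluded_topics : List String), Dom_generate_excluded_list_prompt excluded_topics → Spec_generate_excluded_list_prompt excluded_topics (generate_excluded_list_prompt excluded_topics)

-- ===== LEMMAS AND PROOFS =====

-- A's loop body (ensure-key-then-append) is exactly dict.modify with default []
theorem pvStep_eq_modify (d : PySem.Dict String (List String)) (topic : String) :
    (let pfx := pvPrefixA topic
     let d := if d.contains pfx then d else d.insert pfx ([] : List String)
     d.insert pfx (d.getD pfx [] ++ [topic]))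
    = d.modify (pvPrefixA topic) [] (· ++ [topic]) := by
  simp only [PySem.Dict.modify]
  by_cases h : d.contains (pvPrefixA topic)
  · simp [h]
  · simp only [Bool.not_eq_true] at h
    simp [h, PySem.Dict.getD_insert_self, PySem.Dict.insert_insert_self,
      PySem.Dict.getD_of_not_contains d _ h]

-- the grouped dict's items: first-insertion-ordered distinct prefixes, each with its filtered group
theorem pvItems_grouped (xs : List String) :
    (xs.foldl (fun d topic =>
      let pfx := pvPrefixA topic
      let d := if d.contains pfx then d else d.insert pfx ([] : List String)
      d.insert pfx (d.getD pfx [] ++ [topic])) PySem.Dict.empty).items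
    = (PySem.Set.ofList (xs.map pvPrefixA)).map
        (fun k => (k, xs.filter (fun t => pvPrefixA t == k))) := by
  have h1 := PySem.List.foldl_congr_mem xs _
    (fun d t => PySem.Dict.modify d (pvPrefixA t) [] (· ++ [t])) PySem.Dict.empty
    (fun d t _ => pvStep_eq_modify d t)
  rw [h1]
  have hnd : (xs.foldl (fun d t => d.modify (pvPrefixA t) [] (· ++ [t]))
      PySem.Dict.empty).keys.Nodup :=
    PySem.Dict.nodup_keys_foldl_modify_key xs pvPrefixA [] (fun _ t v => v ++ [t]) _
      (by simp)
  rw [PySem.Dict.items_eq_map_keys _ hnd []]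
  rw [PySem.Dict.keys_foldl_modify_key xs pvPrefixA [] (fun _ t v => v ++ [t])]
  have hkeys : PySem.Set.update (PySem.Dict.empty : PySem.Dict String (List String)).keys
      (xs.map pvPrefixA) = PySem.Set.ofList (xs.map pvPrefixA) := rfl
  rw [hkeys]
  apply List.map_congr_left
  intro k _
  have hfold : xs.foldl (fun d t => d.modify (pvPrefixA t) [] (· ++ [t]))
        (PySem.Dict.empty : PySem.Dict String (List String))
      = (xs.map (fun t => (pvPrefixA t, t))).foldl
          (fun d p => d.modify p.1 [] (· ++ [p.2])) PySem.Dict.empty := by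
    rw [List.foldl_map]
  rw [hfold, PySem.Dict.getD_foldl_modify_append]
  simp [List.filter_map, List.map_map, Function.comp_def]

-- sorting the items by key = mapping the groups over the sorted distinct prefixes
theorem pvSorted_items (xs : List String) :
    PySem.List.sorted
      ((PySem.Set.ofList (xs.map pvPrefixA)).map
        (fun k => (k, xs.filter (fun t => pvPrefixA t == k))))
      (fun p => p.1)
    = (PySem.List.sorted (PySem.Set.ofList (xs.map pvPrefixA)) (fun x => x)).map
        (fun k => (k, xs.filter (fun t => pvPrefixA t == k))) := by
  apply PySem.List.sorted_eq_of_perm_of_pairwise_lt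
  · exact (PySem.List.sorted_perm _ _ _).map _
  · exact (PySem.List.sorted_ofList_pairwise_lt _).map _ (fun a b h => h)

-- ===== VERDICT (by name: the statement is the Claim_ definition above) =====
theorem generate_excluded_list_prompt_spec : Claim_equal_generate_excluded_list_prompt := by
  intro xs _
  show _ = _
  unfold generate_excluded_list_prompt generate_excluded_list_prompt_alt
  by_cases hxs : xs = []
  · simp [hxs]
  · simp only [hxs, if_false]
    rw [pvItems_grouped, pvSorted_items, List.map_map]
    rfl
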